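-- pv_equiv track=rewrite | github.com/gilbutITbook/080338 | 14장/외톨이_알파벳.py | solution
-- ===== SOURCE A (Python) =====
-- def solution(input_string):
--     d = {}
--     prev = None
--
--     for x in input_string:
--         if x in d and prev != x: d[x] = True
--         elif x not in d: d[x] = False
--         prev = x
--
--     answer = [k if d[k] else '' for k in d]
--     return ''.join(sorted(answer)) or 'N'
-- ===== SOURCE B (Python) =====
-- def solution(input_string):
--     chars = list(input_string)
--     runs = [c for prev, c in zip([None] + chars, chars) if prev != c]
--     tally = {}
--     for c in runs:
--         tally[c] = tally.get(c, 0) + 1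
--     lonely = sorted(c for c in tally if tally[c] >= 2)
--     return ''.join(lonely) if lonely else 'N'
-- ===== Notes on version B (the rewrite author's own statement) =====
-- stated objective: alternative
-- what changed: B collapses the string into run heads (zip each character with its predecessor, keep those that differ), tallies in one pass how many runs each letter heads, and declares a letter lonely iff that tally is >= 2; A instead drives a char->seen/lonely flag dict with a prev variable and joins a sorted list of chars-or-empty-strings.
import Mathlib
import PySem

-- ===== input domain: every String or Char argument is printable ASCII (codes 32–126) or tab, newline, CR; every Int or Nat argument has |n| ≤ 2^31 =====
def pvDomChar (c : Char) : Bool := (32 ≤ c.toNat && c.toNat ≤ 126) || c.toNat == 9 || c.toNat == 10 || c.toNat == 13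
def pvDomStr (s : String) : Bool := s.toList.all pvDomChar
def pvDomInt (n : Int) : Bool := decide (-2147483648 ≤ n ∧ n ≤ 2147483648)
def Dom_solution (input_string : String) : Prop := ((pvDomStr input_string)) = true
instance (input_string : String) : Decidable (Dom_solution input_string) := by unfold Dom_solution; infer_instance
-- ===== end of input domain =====

-- B rebuilds the answer from the run heads of the string (collapse consecutive repeats, then
-- tally how many runs each letter starts; lonely = heads >= 2 runs) instead of A's seen/lonely
-- flag dict driven by `prev`; objective: alternative decomposition, same cost.

-- ===== PORT A =====
-- the body of A's for-loop over (d, prev)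
def solutionStep (st : PySem.Dict Char Bool × Option Char) (x : Char) :
    PySem.Dict Char Bool × Option Char :=
  (if st.1.contains x && (st.2 != some x) then st.1.insert x true
   else if !(st.1.contains x) then st.1.insert x false
   else st.1,
   some x)

def solution (input_string : String) : String :=
  let st := input_string.toList.foldl solutionStep (PySem.Dict.empty, none)
  let d := st.1
  let answer := d.keys.map (fun k => if d.getD k false then String.ofList [k] else "")
  let s := PySem.Str.join "" (PySem.List.sorted answer (fun x => x) false)
  if s = "" then "N" else s

-- ===== PORT B =====
def solution_alt (input_string : String) : String :=
  let chars := input_string.toList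
  let runs := ((List.zip ((none : Option Char) :: chars.map some) chars).filter
      (fun pc => pc.1 != some pc.2)).map (·.2)
  let tally := runs.foldl (fun (d : PySem.Dict Char Int) c => d.insert c (d.getD c 0 + 1))
      PySem.Dict.empty
  let lonely := PySem.List.sorted
      (tally.keys.filter (fun c => 2 ≤ tally.getD c 0))
      (fun x => x) false
  if lonely = [] then "N" else String.ofList lonely

-- ===== PRECONDITION & SPEC =====
def Spec_solution (input_string : String) (out : String) : Prop := out = solution_alt input_string
instance (input_string : String) (out : String) : Decidable (Spec_solution input_string out) := by unfold Spec_solution; infer_instance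

-- ===== CLAIM (what is proved, stated in full; the proofs are below) =====
def Claim_equal_solution : Prop := ∀ (input_string : String), Dom_solution input_string → Spec_solution input_string (solution input_string)

-- ===== LEMMAS AND PROOFS =====

-- the last character of `p`, or `prev` if `p` is empty (A's `prev` variable)
def lastOpt (prev : Option Char) (p : List Char) : Option Char :=
  p.foldl (fun _ x => some x) prev

-- heads of the maximal runs of consecutive equal characters, given the character before `p`
def runHeads (prev : Option Char) (p : List Char) : List Char :=
  match p with
  | [] => []
  | x :: xs => if some x = prev then runHeads prev xs else x :: runHeads (some x) xs

theorem lastOpt_nil (prev : Option Char) : lastOpt prev [] = prev := rfl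

theorem lastOpt_append_singleton (prev : Option Char) (p : List Char) (x : Char) :
    lastOpt prev (p ++ [x]) = some x := by
  simp [lastOpt]

theorem lastOpt_mem (prev : Option Char) (p : List Char) (y : Char)
    (h : lastOpt prev p = some y) : prev = some y ∨ y ∈ p := by
  induction p generalizing prev with
  | nil => exact Or.inl h
  | cons a t ih =>
    rcases ih (some a) h with h' | h'
    · have ha := Option.some_inj.mp h'
      subst ha
      exact Or.inr List.mem_cons_self
    · exact Or.inr (List.mem_cons_of_mem _ h')

theorem runHeads_append_singleton (prev : Option Char) (p : List Char) (x : Char) :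
    runHeads prev (p ++ [x]) =
      runHeads prev p ++ (if some x = lastOpt prev p then [] else [x]) := by
  induction p generalizing prev with
  | nil => simp [runHeads, lastOpt_nil]
  | cons a t ih =>
    by_cases h : some a = prev
    · rw [← h]
      show runHeads (some a) (a :: (t ++ [x])) = _
      simp only [runHeads, if_pos]
      have hl : lastOpt (some a) (a :: t) = lastOpt (some a) t := rfl
      rw [hl]
      exact ih (some a)
    · show runHeads prev (a :: (t ++ [x])) = _
      simp only [runHeads, if_neg h]
      have hl : lastOpt prev (a :: t) = lastOpt (some a) t := rfl
      rw [hl, ih (some a)]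
      rfl

theorem mem_of_mem_runHeads {prev : Option Char} {p : List Char} {x : Char}
    (h : x ∈ runHeads prev p) : x ∈ p := by
  induction p generalizing prev with
  | nil => simp [runHeads] at h
  | cons a t ih =>
    by_cases h' : some a = prev
    · simp only [runHeads, if_pos h'] at h
      exact List.mem_cons_of_mem _ (ih h)
    · simp only [runHeads, if_neg h'] at h
      rcases List.mem_cons.mp h with h | h
      · simp [h]
      · exact List.mem_cons_of_mem _ (ih h)

theorem mem_runHeads_of_mem {prev : Option Char} {p : List Char} {x : Char}
    (h : x ∈ p) : some x = prev ∨ x ∈ runHeads prev p := by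
  induction p generalizing prev with
  | nil => cases h
  | cons a t ih =>
    by_cases h' : some a = prev
    · simp only [runHeads, if_pos h']
      rcases List.mem_cons.mp h with rfl | h
      · exact Or.inl h'
      · exact ih h
    · simp only [runHeads, if_neg h']
      rcases List.mem_cons.mp h with rfl | h
      · exact Or.inr (List.mem_cons_self)
      · rcases ih (prev := some a) h with h'' | h''
        · have ha := Option.some_inj.mp h''
          subst ha
          exact Or.inr List.mem_cons_self
        · exact Or.inr (List.mem_cons_of_mem _ h'')

theorem mem_runHeads_none {p : List Char} {x : Char} :
    x ∈ runHeads none p ↔ x ∈ p := by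
  constructor
  · exact mem_of_mem_runHeads
  · intro h; rcases mem_runHeads_of_mem h with h' | h'
    · exact (Option.some_ne_none x h').elim
    · exact h'

-- B's zip/filter comprehension computes exactly the run heads
theorem zip_filter_eq_runHeads (prev : Option Char) (p : List Char) :
    ((List.zip (prev :: p.map some) p).filter
        (fun pc => pc.1 != some pc.2)).map (·.2) = runHeads prev p := by
  induction p generalizing prev with
  | nil => rfl
  | cons a t ih =>
    show (((prev, a) :: List.zip (some a :: t.map some) t).filter _).map _ = _
    by_cases h : some a = prev
    · rw [← h]
      simp only [runHeads, List.filter_cons]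
      norm_num
      exact ih (some a)
    · simp only [runHeads, if_neg h, List.filter_cons]
      have hb : (prev != some a) = true := by
        simp [bne_iff_ne]
        exact fun he => h he.symm
      rw [hb]
      simp only [if_pos trivial, List.map_cons]
      rw [ih (some a)]
  

-- invariant of A's loop
theorem loopInv (p : List Char) :
    (p.foldl solutionStep (PySem.Dict.empty, none)).2 = lastOpt none p
  ∧ (p.foldl solutionStep (PySem.Dict.empty, none)).1.keys = PySem.List.dedup p
  ∧ ∀ k, (p.foldl solutionStep (PySem.Dict.empty, none)).1.get? k =
      if k ∈ p then some (decide (2 ≤ (runHeads none p).count k)) else none := by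
  induction p using List.reverseRecOn with
  | nil =>
    refine ⟨rfl, rfl, fun k => ?_⟩
    simp [PySem.Dict.get?_empty]
  | append_singleton p x ih =>
    obtain ⟨h2, hk, hg⟩ := ih
    have hcont : (p.foldl solutionStep (PySem.Dict.empty, none)).1.contains x = decide (x ∈ p) := by
      by_cases hx : x ∈ p
      · simp only [hx, decide_true]
        exact (PySem.Dict.contains_iff_mem_keys _ _).mpr (by rw [hk]; exact (PySem.List.mem_dedup _ _).mpr hx)
      · simp only [hx, decide_false]
        by_contra hc
        exact hx ((PySem.List.mem_dedup _ _).mp (hk ▸ (PySem.Dict.contains_iff_mem_keys _ _).mp (by simpa using hc)))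
    have hfold : (p ++ [x]).foldl solutionStep (PySem.Dict.empty, none) =
        solutionStep (p.foldl solutionStep (PySem.Dict.empty, none)) x := by
      rw [List.foldl_append]; rfl
    set st := p.foldl solutionStep (PySem.Dict.empty, none) with hst
    refine ⟨by rw [hfold, lastOpt_append_singleton]; rfl, ?_, ?_⟩
    all_goals rw [hfold]
    · -- keys
      by_cases hx : x ∈ p
      · have hc : st.1.contains x = true := by rw [hcont]; simp [hx]
        have hded : PySem.List.dedup (p ++ [x]) = PySem.List.dedup p := by
          simp only [PySem.List.dedup_eq_ofList, PySem.Set.ofList_append_singleton]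
          exact PySem.Set.add_of_mem ((PySem.Set.mem_ofList _ _).mpr hx)
        rw [hded, ← hk]
        simp only [solutionStep, hc]
        by_cases hpx : st.2 = some x
        · simp [hpx]
        · have hb : (st.2 != some x) = true := bne_iff_ne.mpr hpx
          simp only [hb, Bool.and_true]
          exact PySem.Dict.keys_insert_of_contains _ _ hc
      · have hc : st.1.contains x = false := by rw [hcont]; simp [hx]
        have hded : PySem.List.dedup (p ++ [x]) = PySem.List.dedup p ++ [x] := by
          simp only [PySem.List.dedup_eq_ofList, PySem.Set.ofList_append_singleton]
          exact PySem.Set.add_of_not_mem (fun hm => hx ((PySem.Set.mem_ofList _ _).mp hm))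
        have hstep : (solutionStep st x).1 = st.1.insert x false := by
          simp [solutionStep, hc]
        rw [hstep, PySem.Dict.keys_insert_of_not_contains _ _ hc, hk, hded]
    · -- get?
      intro k
      have hR : runHeads none (p ++ [x]) =
          runHeads none p ++ (if some x = lastOpt none p then [] else [x]) :=
        runHeads_append_singleton none p x
      by_cases hx : x ∈ p
      · have hc : st.1.contains x = true := by rw [hcont]; simp [hx]
        by_cases hpx : st.2 = some x
        · -- same as previous char: dict unchanged, runHeads unchanged
          have hlast : some x = lastOpt none p := by rw [← h2, hpx]
          rw [hR, if_pos hlast, List.append_nil]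
          have hstep : (solutionStep st x).1 = st.1 := by
            simp [solutionStep, hpx, hc]
          rw [hstep, hg k]
          by_cases hkp : k ∈ p
          · simp [hkp, List.mem_append.mpr (Or.inl hkp)]
          · have : ¬ k ∈ p ++ [x] := by
              intro hm
              rcases List.mem_append.mp hm with h | h
              · exact hkp h
              · have hkx : k = x := by simpa using h
                exact hkp (hkx ▸ hx)
            simp [hkp, this]
        · -- new run of a seen char: d[x] := True
          have hlast : ¬ some x = lastOpt none p := by rw [← h2]; exact fun he => hpx he.symm
          rw [hR, if_neg hlast]
          have hb : (st.2 != some x) = true := bne_iff_ne.mpr hpx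
          have hstep : (solutionStep st x).1 = st.1.insert x true := by
            simp [solutionStep, hc, hb]
          rw [hstep]
          by_cases hkx : k = x
          · subst hkx
            rw [PySem.Dict.get?_insert_self]
            have hmem : k ∈ runHeads none p := mem_runHeads_none.mpr hx
            have hcnt : 1 ≤ (runHeads none p).count k := List.count_pos_iff.mpr hmem
            have : (2 ≤ ((runHeads none p) ++ [k]).count k) := by
              rw [List.count_append]; simp; omega
            rw [if_pos (List.mem_append.mpr (Or.inl hx))]
            simp only [this, decide_true]
          · rw [PySem.Dict.get?_insert_of_ne _ _ hkx, hg k]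
            have hcnt : ((runHeads none p) ++ [x]).count k = (runHeads none p).count k := by
              have h1 : List.count k [x] = 0 := List.count_eq_zero.mpr (by simp [hkx])
              simp [List.count_append, h1]
            rw [hcnt]
            by_cases hkp : k ∈ p
            · simp [hkp, List.mem_append.mpr (Or.inl hkp)]
            · have : ¬ k ∈ p ++ [x] := by
                intro hm
                rcases List.mem_append.mp hm with h | h
                · exact hkp h
                · exact hkx (by simpa using h)
              simp [hkp, this]
      · -- brand new char: d[x] := False
        have hc : st.1.contains x = false := by rw [hcont]; simp [hx]
        have hlast : ¬ some x = lastOpt none p := by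
          intro he
          rcases lastOpt_mem none p x he.symm with h | h
          · simp at h
          · exact hx h
        rw [hR, if_neg hlast]
        have hstep : (solutionStep st x).1 = st.1.insert x false := by
          simp [solutionStep, hc]
        rw [hstep]
        by_cases hkx : k = x
        · subst hkx
          rw [PySem.Dict.get?_insert_self]
          have hmem : ¬ k ∈ runHeads none p := fun hm => hx (mem_runHeads_none.mp hm)
          have hcnt : ((runHeads none p) ++ [k]).count k = 1 := by
            rw [List.count_append, List.count_eq_zero.mpr hmem]; simp
          rw [hcnt]
          simp [List.mem_append]
        · rw [PySem.Dict.get?_insert_of_ne _ _ hkx, hg k]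
          have hcnt : ((runHeads none p) ++ [x]).count k = (runHeads none p).count k := by
            have h1 : List.count k [x] = 0 := List.count_eq_zero.mpr (by simp [hkx])
            simp [List.count_append, h1]
          rw [hcnt]
          by_cases hkp : k ∈ p
          · simp [hkp, List.mem_append.mpr (Or.inl hkp)]
          · have : ¬ k ∈ p ++ [x] := by
              intro hm
              rcases List.mem_append.mp hm with h | h
              · exact hkp h
              · exact hkx (by simpa using h)
            simp [hkp, this]

-- join with an empty separator ignores empty pieces
theorem join_nil_replicate (m : Nat) (l : List (List Char)) :
    PySem.Chars.join [] (List.replicate m [] ++ l) = PySem.Chars.join [] l := by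
  induction m with
  | zero => rfl
  | succ n ih =>
    have haux : ∀ t : List (List Char), PySem.Chars.join [] ([] :: t) = PySem.Chars.join [] t := by
      intro t
      cases t with
      | nil => rw [PySem.Chars.join_singleton, PySem.Chars.join_nil]
      | cons q rest => rw [PySem.Chars.join_cons_cons]; rfl
    rw [List.replicate_succ, List.cons_append, haux, ih]

theorem nil_le_chars (l : List Char) : ([] : List Char) ≤ l := by
  by_contra h; simp at h

theorem singleton_le_singleton {a b : Char} (h : a ≤ b) :
    String.ofList [a] ≤ String.ofList [b] := by
  rw [String.le_iff_toList_le, String.toList_ofList, String.toList_ofList]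
  by_contra h'
  have hlt : List.Lex (· < ·) [b] [a] := lt_of_not_ge fun hge => h' hge
  cases hlt with
  | cons h2 => cases h2
  | rel h2 => exact absurd h2 (not_lt.mpr h)

-- ===== VERDICT (by name: the statement is the Claim_ definition above) =====
theorem main_eq (s : String) : solution s = solution_alt s := by
  obtain ⟨h2, hk, hg⟩ := loopInv s.toList
  simp only [solution, solution_alt]
  rw [zip_filter_eq_runHeads none s.toList]
  set p := s.toList with hp
  set R := runHeads none p with hRdef
  set pred : Char → Bool := fun k => decide (2 ≤ R.count k) with hpred
  set d := (p.foldl solutionStep (PySem.Dict.empty, none)).1 with hd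
  set cs := PySem.List.sorted ((PySem.List.dedup p).filter pred) (fun x => x) false with hcs
  set m := ((PySem.List.dedup p).filter (fun k => !pred k)).length with hm
  have hmap : d.keys.map (fun k => if d.getD k false then String.ofList [k] else "")
      = (PySem.List.dedup p).map (fun k => if pred k then String.ofList [k] else "") := by
    rw [hk]
    refine List.map_congr_left ?_
    intro k hkmem
    have hkp : k ∈ p := (PySem.List.mem_dedup _ _).mp hkmem
    have hval : d.getD k false = pred k := by
      rw [PySem.Dict.getD_eq_get?_getD, hg k, if_pos hkp]; rfl
    rw [hval]
  rw [hmap]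
  have hsorted : PySem.List.sorted
      ((PySem.List.dedup p).map (fun k => if pred k then String.ofList [k] else "")) (fun x => x) false
      = List.replicate m "" ++ cs.map (fun c => String.ofList [c]) := by
    apply PySem.List.sorted_id_eq_of_perm_of_pairwise
    · -- permutation
      have base := (List.filter_append_perm pred (PySem.List.dedup p)).map
        (fun k => if pred k then String.ofList [k] else "")
      rw [List.map_append] at base
      have e1 : ((PySem.List.dedup p).filter pred).map (fun k => if pred k then String.ofList [k] else "")
          = ((PySem.List.dedup p).filter pred).map (fun k => String.ofList [k]) := by
        refine List.map_congr_left ?_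
        intro k hkmem
        rw [if_pos (List.of_mem_filter hkmem)]
      have e2 : ((PySem.List.dedup p).filter (fun k => !pred k)).map (fun k => if pred k then String.ofList [k] else "")
          = List.replicate m "" := by
        rw [List.map_congr_left (g := fun _ => ("" : String)) ?_, List.map_const']
        intro k hkmem
        have := List.of_mem_filter hkmem
        simp only [Bool.not_eq_eq_eq_not, Bool.not_true] at this
        rw [if_neg (by simp [this])]
      rw [e1, e2] at base
      exact (List.perm_append_comm).trans
        ((((PySem.List.sorted_perm _ _ _).map _).append_right _).trans base)
    · -- sortedness
      rw [List.pairwise_append]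
      refine ⟨?_, ?_, ?_⟩
      · exact List.pairwise_replicate_of_refl
      · exact (PySem.List.sorted_pairwise _ _).map _ (fun a b hab => singleton_le_singleton hab)
      · intro x hxm y hym
        rw [List.eq_of_mem_replicate hxm, String.le_iff_toList_le]
        exact nil_le_chars _
  rw [hsorted]
  have hjoin : PySem.Str.join "" (List.replicate m "" ++ cs.map (fun c => String.ofList [c]))
      = String.ofList cs := by
    have ht : (PySem.Str.join "" (List.replicate m "" ++ cs.map (fun c => String.ofList [c]))).toList = cs := by
      rw [PySem.Str.toList_join, List.map_append, List.map_replicate, List.map_map]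
      have : (String.toList ∘ fun c => String.ofList [c]) = fun c => [c] := by
        funext c; simp [String.toList_ofList]
      rw [this]
      show PySem.Chars.join [] (List.replicate m "".toList ++ _) = _
      have h0 : ("" : String).toList = [] := rfl
      rw [h0, join_nil_replicate, PySem.Chars.join_nil_singletons]
    calc PySem.Str.join "" (List.replicate m "" ++ cs.map (fun c => String.ofList [c]))
        = String.ofList (PySem.Str.join "" (List.replicate m "" ++ cs.map (fun c => String.ofList [c]))).toList :=
          String.ofList_toList.symm
      _ = String.ofList cs := by rw [ht]
  rw [hjoin]
  rw [PySem.Dict.foldl_insert_getD_add_one_eq_counter]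
  have hlonely : PySem.List.sorted
      ((PySem.Dict.counter R).keys.filter (fun c => decide (2 ≤ (PySem.Dict.counter R).getD c 0)))
      (fun x => x) false = cs := by
    rw [hcs]
    apply PySem.List.sorted_eq_sorted_of_perm _ _ _ (fun a b h => h)
    refine (List.perm_ext_iff_of_nodup ((PySem.Dict.nodup_keys_counter _).filter _)
      ((PySem.List.nodup_dedup _).filter _)).mpr ?_
    intro a
    rw [List.mem_filter, List.mem_filter, PySem.Dict.keys_counter, PySem.Set.mem_ofList,
      PySem.Dict.getD_counter]
    constructor
    · rintro ⟨ha, hc⟩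
      refine ⟨(PySem.List.mem_dedup _ _).mpr (mem_runHeads_none.mp ha), ?_⟩
      rw [hpred]
      simp only [decide_eq_true_eq] at hc ⊢
      exact_mod_cast hc
    · rintro ⟨ha, hc⟩
      rw [hpred] at hc
      refine ⟨mem_runHeads_none.mpr ((PySem.List.mem_dedup _ _).mp ha), ?_⟩
      simp only [decide_eq_true_eq] at hc ⊢
      exact_mod_cast hc
  rw [hlonely]
  by_cases hnil : cs = []
  · rw [hnil]
    simp
  · rw [if_neg hnil, if_neg ?_]
    intro h
    exact hnil (by simpa using congrArg String.toList h)

theorem solution_spec : Claim_equal_solution := by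
  intro s _
  exact main_eq s
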